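-- pv_equiv track=rewrite | github.com/usefortemp787/lib | binning.py | binBy_Boundary
-- ===== SOURCE A (Python) =====
-- def binBy_Boundary(data,n):
--     sarr = sorted(data)
--     bin_size = len(sarr) // n
--     res = []
--     for i in range(0,len(sarr),bin_size):
--         slist = sarr[i:i+bin_size]
--         mini = min(slist)
--         maxi = max(slist)
--         for i in range(0,len(slist)):
--             if abs(slist[i]-mini)<abs(slist[i]-maxi):
--                 slist[i] = mini
--             else :
--                 slist[i] = maxi
--         res.append(slist)
--     return res
-- ===== SOURCE B (Python) =====
-- def binBy_Boundary(data, n):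
--     sarr = sorted(data)
--     bin_size = len(sarr) // n
--     res = []
--     for i in range(0, len(sarr), bin_size):
--         s = sarr[i:i + bin_size]
--         mini = s[0]
--         maxi = s[-1]
--         t = mini + maxi
--         # binary search: lo = number of elements with 2*x < mini+maxi (a prefix, s is sorted)
--         lo, hi = 0, len(s)
--         while lo < hi:
--             m = (lo + hi) // 2
--             if 2 * s[m] < t:
--                 lo = m + 1
--             else:
--                 hi = m
--         res.append([mini] * lo + [maxi] * (len(s) - lo))
--     return res
-- ===== Notes on version B (the rewrite author's own statement) =====
-- stated objective: alternative
-- what changed: Each bin's per-element if/else rewrite (abs-distance to min vs max) is replaced by a hand-rolled binary search for the split point k (number of elements with 2*x < min+max, a prefix of the sorted slice) and the bin is built as [mini]*k + [maxi]*(len-k); min()/max() scans are replaced by s[0]/s[-1].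
import Mathlib
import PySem

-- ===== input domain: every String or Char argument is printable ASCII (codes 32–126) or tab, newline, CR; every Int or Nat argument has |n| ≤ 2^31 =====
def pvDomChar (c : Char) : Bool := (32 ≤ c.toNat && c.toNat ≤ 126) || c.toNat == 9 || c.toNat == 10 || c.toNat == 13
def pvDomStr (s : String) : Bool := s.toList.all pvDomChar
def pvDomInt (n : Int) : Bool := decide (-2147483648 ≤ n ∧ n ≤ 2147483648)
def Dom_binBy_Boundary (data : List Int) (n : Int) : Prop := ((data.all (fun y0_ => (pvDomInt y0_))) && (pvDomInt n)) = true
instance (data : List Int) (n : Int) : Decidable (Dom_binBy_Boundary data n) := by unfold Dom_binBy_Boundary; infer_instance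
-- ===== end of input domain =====

-- B replaces A's per-element if/else rewrite of each bin by a binary search for the
-- mini/maxi split point and builds each bin as replicate-prefix ++ replicate-suffix
-- (objective: alternative; the dominant cost, sorting, is shared).

-- ===== PORT A =====
def binBy_Boundary (data : List Int) (n : Int) : List (List Int) :=
  let sarr := PySem.List.sorted data (fun x => x)
  let bin_size := PySem.Int.floordiv (sarr.length : Int) n
  (PySem.List.pyRange 0 (sarr.length : Int) bin_size).foldl
    (fun res i =>
      let slist := PySem.List.slice sarr (some i) (some (i + bin_size))
      let mini := (PySem.List.min? slist (fun x => x)).getD 0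
      let maxi := (PySem.List.max? slist (fun x => x)).getD 0
      -- inner 'for i in range(len(slist))' overwrites each slist[i] independently: a map
      let slist := slist.map (fun x => if |x - mini| < |x - maxi| then mini else maxi)
      res ++ [slist]) []

-- ===== PORT B =====
-- hand-rolled bisect loop of Source B: lo/hi while-loop, counts elements with 2*x < t
def pvBisect (s : List Int) (t : Int) (lo hi : Nat) : Nat :=
  if lo < hi then
    let m := (lo + hi) / 2
    if 2 * (PySem.List.pyGetD s (m : Int) 0) < t then pvBisect s t (m + 1) hi
    else pvBisect s t lo m
  else lo
termination_by hi - lo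
decreasing_by all_goals omega

def binBy_Boundary_alt (data : List Int) (n : Int) : List (List Int) :=
  let sarr := PySem.List.sorted data (fun x => x)
  let bin_size := PySem.Int.floordiv (sarr.length : Int) n
  (PySem.List.pyRange 0 (sarr.length : Int) bin_size).foldl
    (fun res i =>
      let s := PySem.List.slice sarr (some i) (some (i + bin_size))
      let mini := PySem.List.pyGetD s 0 0
      let maxi := PySem.List.pyGetD s (-1) 0
      let lo := pvBisect s (mini + maxi) 0 s.length
      res ++ [List.replicate lo mini ++ List.replicate (s.length - lo) maxi]) []

-- ===== PRECONDITION & SPEC =====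
-- Pre_ excludes exactly the inputs where A raises: n == 0 (ZeroDivisionError) and
-- len(data)//n == 0 (range() step 0, ValueError).
def Pre_binBy_Boundary (data : List Int) (n : Int) : Prop :=
  n ≠ 0 ∧ PySem.Int.floordiv (data.length : Int) n ≠ 0
instance (data : List Int) (n : Int) : Decidable (Pre_binBy_Boundary data n) := by
  unfold Pre_binBy_Boundary; infer_instance
def pvWitness_binBy_Boundary : List Int × Int := ([3, 1, 2, 8, 9, 4], 2)

def Spec_binBy_Boundary (data : List Int) (n : Int) (out : List (List Int)) : Prop := out = binBy_Boundary_alt data n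
instance (data : List Int) (n : Int) (out : List (List Int)) : Decidable (Spec_binBy_Boundary data n out) := by unfold Spec_binBy_Boundary; infer_instance

-- ===== CLAIM (what is proved, stated in full; the proofs are below) =====
def Claim_equal_binBy_Boundary : Prop := ∀ (data : List Int) (n : Int), Dom_binBy_Boundary data n → Pre_binBy_Boundary data n → Spec_binBy_Boundary data n (binBy_Boundary data n)

-- ===== LEMMAS AND PROOFS =====

theorem pvFoldlMin (t : List Int) (x : Int) (h : ∀ y ∈ t, x ≤ y) : t.foldl min x = x := by
  induction t generalizing x with
  | nil => rfl
  | cons y tl ih =>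
    simp only [List.foldl_cons]
    rw [min_eq_left (h y (by simp))]
    exact ih x (fun z hz => h z (by simp [hz]))

theorem pvFoldlMax (t : List Int) (x : Int) (h : List.Pairwise (· ≤ ·) (x :: t)) :
    t.foldl max x = (x :: t).getLast (by simp) := by
  induction t generalizing x with
  | nil => rfl
  | cons y tl ih =>
    simp only [List.foldl_cons]
    have hxy : x ≤ y := (List.pairwise_cons.mp h).1 y (by simp)
    rw [max_eq_right hxy]
    have h' : List.Pairwise (· ≤ ·) (y :: tl) := (List.pairwise_cons.mp h).2
    rw [ih y h']
    simp [List.getLast_cons]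

theorem pvLeGetLast (s : List Int) (h : s ≠ []) (hp : List.Pairwise (· ≤ ·) s) :
    ∀ x ∈ s, x ≤ s.getLast h := by
  intro x hx
  obtain ⟨j, hj, rfl⟩ := List.mem_iff_getElem.mp hx
  rw [List.getLast_eq_getElem]
  rcases Nat.lt_or_ge j (s.length - 1) with hlt | hge
  · exact List.pairwise_iff_getElem.mp hp j (s.length - 1) hj (by omega) hlt
  · have : j = s.length - 1 := by have := hj; omega
    subst this; rfl

theorem pvMapSplit (s : List Int) (t mini maxi : Int) (hp : List.Pairwise (· ≤ ·) s) :
    s.map (fun x => if 2 * x < t then mini else maxi)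
      = List.replicate (s.countP (fun x => decide (2 * x < t))) mini
        ++ List.replicate (s.length - s.countP (fun x => decide (2 * x < t))) maxi := by
  induction s with
  | nil => rfl
  | cons a tl ih =>
    obtain ⟨ha, hp'⟩ := List.pairwise_cons.mp hp
    by_cases hpa : 2 * a < t
    · simp only [List.map_cons, List.countP_cons, hpa, decide_true, if_true]
      rw [ih hp']
      simp [List.replicate_succ]
    · have htl : ∀ y ∈ tl, ¬ (2 * y < t) := fun y hy h2 => hpa (by have := ha y hy; omega)
      have hc0 : tl.countP (fun x => decide (2 * x < t)) = 0 := by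
        rw [List.countP_eq_zero]; intro y hy; simpa using htl y hy
      have hmap : tl.map (fun x => if 2 * x < t then mini else maxi) = List.replicate tl.length maxi := by
        rw [List.eq_replicate_iff]
        refine ⟨by simp, ?_⟩
        intro b hb
        obtain ⟨y, hy, rfl⟩ := List.mem_map.mp hb
        simp [htl y hy]
      simp [hpa, hc0, hmap, List.replicate_succ]

theorem pvCountPrefix (s : List Int) (p : Int → Bool) (r : Nat) (hr : r ≤ s.length)
    (h1 : ∀ j (hj : j < s.length), j < r → p s[j])
    (h2 : ∀ j (hj : j < s.length), r ≤ j → ¬ p s[j]) :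
    s.countP p = r := by
  rw [← List.take_append_drop r s, List.countP_append]
  have ht : (s.take r).countP p = r := by
    rw [List.countP_eq_length.mpr, List.length_take_of_le hr]
    intro x hx
    obtain ⟨j, hj, rfl⟩ := List.mem_iff_getElem.mp hx
    rw [List.getElem_take]
    exact h1 j (by simp at hj; omega) (by simp at hj; omega)
  have hd : (s.drop r).countP p = 0 := by
    rw [List.countP_eq_zero]
    intro x hx
    obtain ⟨j, hj, rfl⟩ := List.mem_iff_getElem.mp hx
    rw [List.getElem_drop]
    simpa using h2 (r + j) (by simp at hj; omega) (by omega)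
  omega

theorem pvBisectInvAux (s : List Int) (t : Int) (hp : List.Pairwise (· ≤ ·) s) :
    ∀ (k lo hi : Nat), hi - lo ≤ k → lo ≤ hi → hi ≤ s.length →
    (∀ j (hj : j < s.length), j < lo → 2 * s[j] < t) →
    (∀ j (hj : j < s.length), hi ≤ j → ¬ 2 * s[j] < t) →
    pvBisect s t lo hi = s.countP (fun x => decide (2 * x < t)) := by
  intro k
  induction k with
  | zero =>
    intro lo hi hk hle hhi h1 h2
    have : lo = hi := by omega
    subst this
    rw [pvBisect, if_neg (by omega)]
    exact (pvCountPrefix s _ lo (by omega) (by simpa using h1) (by simpa using h2)).symm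
  | succ k ih =>
    intro lo hi hk hle hhi h1 h2
    by_cases hlt : lo < hi
    · rw [pvBisect, if_pos hlt]
      have hm1 : lo ≤ (lo + hi) / 2 := by omega
      have hm2 : (lo + hi) / 2 < hi := by omega
      have hmlen : (lo + hi) / 2 < s.length := by omega
      have hget : PySem.List.pyGetD s (((lo + hi) / 2 : Nat) : Int) 0 = s[(lo + hi) / 2] := by
        rw [PySem.List.pyGetD_natCast, List.getD_eq_getElem s 0 hmlen]
      simp only [hget]
      by_cases hc : 2 * s[(lo + hi) / 2] < t
      · rw [if_pos hc]
        refine ih ((lo + hi) / 2 + 1) hi (by omega) (by omega) hhi ?_ h2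
        intro j hj hjlt
        rcases Nat.lt_or_ge j lo with h | h
        · exact h1 j hj h
        · have hle2 : s[j] ≤ s[(lo + hi) / 2] := by
            rcases Nat.lt_or_ge j ((lo + hi) / 2) with hh | hh
            · exact List.pairwise_iff_getElem.mp hp j _ hj hmlen hh
            · have : j = (lo + hi) / 2 := by omega
              subst this; rfl
          omega
      · rw [if_neg hc]
        refine ih lo ((lo + hi) / 2) (by omega) (by omega) (by omega) h1 ?_
        intro j hj hjge
        rcases Nat.lt_or_ge j hi with h | h
        · intro habs
          have hle2 : s[(lo + hi) / 2] ≤ s[j] := by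
            rcases Nat.lt_or_ge ((lo + hi) / 2) j with hh | hh
            · exact List.pairwise_iff_getElem.mp hp _ j hmlen hj hh
            · have : j = (lo + hi) / 2 := by omega
              subst this; rfl
          omega
        · exact h2 j hj h
    · have : lo = hi := by omega
      subst this
      rw [pvBisect, if_neg (by omega)]
      exact (pvCountPrefix s _ lo (by omega) (by simpa using h1) (by simpa using h2)).symm

theorem pvBisectCount (s : List Int) (t : Int) (hp : List.Pairwise (· ≤ ·) s) :
    pvBisect s t 0 s.length = s.countP (fun x => decide (2 * x < t)) :=
  pvBisectInvAux s t hp s.length 0 s.length (by omega) (by omega) (by omega)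
    (by omega) (fun j hj hge => by omega)

theorem pvBinEq (s : List Int) (hne : s ≠ []) (hsps : List.Pairwise (· ≤ ·) s) :
    s.map (fun x =>
        if |x - (PySem.List.min? s (fun x => x)).getD 0| < |x - (PySem.List.max? s (fun x => x)).getD 0|
        then (PySem.List.min? s (fun x => x)).getD 0 else (PySem.List.max? s (fun x => x)).getD 0)
      = List.replicate (pvBisect s (PySem.List.pyGetD s 0 0 + PySem.List.pyGetD s (-1) 0) 0 s.length)
          (PySem.List.pyGetD s 0 0)
        ++ List.replicate
            (s.length - pvBisect s (PySem.List.pyGetD s 0 0 + PySem.List.pyGetD s (-1) 0) 0 s.length)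
            (PySem.List.pyGetD s (-1) 0) := by
  obtain ⟨m, tl, rfl⟩ := List.exists_cons_of_ne_nil hne
  have hmle : ∀ x ∈ m :: tl, m ≤ x := by
    intro x hx
    rcases List.mem_cons.mp hx with rfl | hx'
    · exact le_refl _
    · exact (List.pairwise_cons.mp hsps).1 x hx'
  have hL := pvLeGetLast (m :: tl) hne hsps
  have hmin : (PySem.List.min? (m :: tl) (fun x => x)).getD 0 = m := by
    rw [PySem.List.min?_id_cons, Option.getD_some]
    exact pvFoldlMin tl m (fun y hy => hmle y (List.mem_cons_of_mem _ hy))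
  have hmax : (PySem.List.max? (m :: tl) (fun x => x)).getD 0 = (m :: tl).getLast hne := by
    rw [PySem.List.max?_id_cons, Option.getD_some, pvFoldlMax tl m hsps]
  have hget0 : PySem.List.pyGetD (m :: tl) 0 0 = m := PySem.List.pyGetD_zero_cons m tl 0
  have hgetL : PySem.List.pyGetD (m :: tl) (-1) 0 = (m :: tl).getLast hne :=
    PySem.List.pyGetD_neg_one (m :: tl) 0 hne
  rw [hmin, hmax, hget0, hgetL]
  have hmapc : (m :: tl).map (fun x =>
        if |x - m| < |x - (m :: tl).getLast hne| then m else (m :: tl).getLast hne)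
      = (m :: tl).map (fun x =>
        if 2 * x < m + (m :: tl).getLast hne then m else (m :: tl).getLast hne) := by
    apply List.map_congr_left
    intro x hx
    have h1 : m ≤ x := hmle x hx
    have h2 : x ≤ (m :: tl).getLast hne := hL x hx
    have e1 : |x - m| = x - m := abs_of_nonneg (by omega)
    have e2 : |x - (m :: tl).getLast hne| = (m :: tl).getLast hne - x := by
      rw [abs_sub_comm]; exact abs_of_nonneg (by omega)
    rw [e1, e2]
    by_cases hc : 2 * x < m + (m :: tl).getLast hne
    · rw [if_pos (by omega), if_pos hc]
    · rw [if_neg (by omega), if_neg hc]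
  rw [hmapc, pvMapSplit (m :: tl) (m + (m :: tl).getLast hne) m ((m :: tl).getLast hne) hsps,
    pvBisectCount (m :: tl) (m + (m :: tl).getLast hne) hsps]

-- ===== VERDICT (by name: the statement is the Claim_ definition above) =====
theorem binBy_Boundary_spec : Claim_equal_binBy_Boundary := by
  intro data n _hdom hpre
  obtain ⟨hn, hbsne⟩ := hpre
  unfold Spec_binBy_Boundary binBy_Boundary binBy_Boundary_alt
  dsimp only
  have hlen : (PySem.List.sorted data (fun x => x)).length = data.length :=
    PySem.List.length_sorted data _ _
  set sarr := PySem.List.sorted data (fun x => x) with hsarr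
  have hbs0 : PySem.Int.floordiv ((sarr.length : Nat) : Int) n ≠ 0 := by
    rw [hlen]; exact hbsne
  have hsp : List.Pairwise (· ≤ ·) sarr := by
    simpa using PySem.List.sorted_pairwise data (fun x => x)
  rcases lt_or_gt_of_ne hbs0 with hneg | hpos
  · -- negative bin_size: range(0, len, bs) is empty, both fold over [] and return []
    have hr : PySem.List.pyRange 0 ((sarr.length : Nat) : Int)
        (PySem.Int.floordiv ((sarr.length : Nat) : Int) n) = [] := by
      unfold PySem.List.pyRange
      rw [if_neg hbs0, if_neg (by omega), if_neg (by omega)]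
      simp
    rw [hr]
    rfl
  · apply PySem.List.foldl_congr_mem
    intro acc i hi
    obtain ⟨hi0, hilt, -⟩ := (PySem.List.mem_pyRange_iff_of_pos hpos i).mp hi
    have hitn : i.toNat < sarr.length := by omega
    set s := PySem.List.slice sarr (some i)
      (some (i + PySem.Int.floordiv ((sarr.length : Nat) : Int) n)) with hsdef
    have hstk : s = (sarr.drop i.toNat).take
        ((i + PySem.Int.floordiv ((sarr.length : Nat) : Int) n).toNat - i.toNat) :=
      PySem.List.slice_toNat sarr hi0 (by omega)
    have hssub : s.Sublist sarr := by
      rw [hstk]; exact ((sarr.drop i.toNat).take_sublist _).trans (sarr.drop_sublist _)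
    have hsps : List.Pairwise (· ≤ ·) s := List.Pairwise.sublist hssub hsp
    have hslen : 0 < s.length := by
      rw [hstk]; simp only [List.length_take, List.length_drop]; omega
    have hne : s ≠ [] := by intro h; rw [h] at hslen; simp at hslen
    rw [pvBinEq s hne hsps]
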